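-- pv_equiv track=rewrite | github.com/micahrodriguez/Bioinformatics-Algorithms | part_2_Biology_meets_programming.py | MaximumSkew
-- ===== SOURCE A (Python) =====
-- def SkewArrayDictionary(Genome):
--     skew = {}
--     skew[0] = 0
--     for i in range (len(Genome)):
--         if Genome[i] == "A" or Genome[i] == "T":
--             skew[i + 1] = skew [i]
--         elif Genome[i] == "G":
--             skew[i + 1] = skew[i] + 1
--         else:
--             skew[i + 1] = skew[i] - 1
--     return skew
--
-- def MaximumSkew(Genome):
-- 	positions = []
-- 	x = SkewArrayDictionary(Genome)
-- 	maximum = max(x.values())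
-- 	for i in x:
-- 		if x[i] == maximum:
-- 			positions.append(i)
-- 	return positions
-- ===== SOURCE B (Python) =====
-- def MaximumSkew(Genome):
--     # one left-to-right pass with a running skew and best-so-far maximum;
--     # no intermediate skew dictionary is built
--     skew = 0
--     maximum = 0
--     positions = [0]
--     for i, c in enumerate(Genome):
--         if c == "G":
--             skew += 1
--         elif c != "A" and c != "T":
--             skew -= 1
--         if skew > maximum:
--             maximum = skew
--             positions = [i + 1]
--         elif skew == maximum:
--             positions.append(i + 1)
--     return positions
-- ===== Notes on version B (the rewrite author's own statement) =====
-- stated objective: faster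
-- what changed: Replaces A's three-phase algorithm (build a position->skew dict, take max of its values, then scan keys collecting matches) with a single left-to-right pass keeping a running skew, a best-so-far maximum and the positions list, which is reset on a strict new maximum; no intermediate dictionary is built.
import Mathlib
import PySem

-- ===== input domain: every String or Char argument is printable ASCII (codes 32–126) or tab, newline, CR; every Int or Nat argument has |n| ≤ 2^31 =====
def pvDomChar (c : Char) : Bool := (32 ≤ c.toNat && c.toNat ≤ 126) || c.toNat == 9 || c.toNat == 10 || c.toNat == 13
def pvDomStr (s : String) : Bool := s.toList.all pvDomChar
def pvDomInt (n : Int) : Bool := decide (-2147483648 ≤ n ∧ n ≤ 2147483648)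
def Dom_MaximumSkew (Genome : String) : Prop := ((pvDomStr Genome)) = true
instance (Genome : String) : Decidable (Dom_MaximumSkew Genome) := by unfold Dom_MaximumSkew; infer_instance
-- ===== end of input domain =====

-- B replaces A's three phases (build skew dict, take max of values, collect matching keys)
-- by a single left-to-right pass with a running skew and a best-so-far maximum (objective: simpler).

-- ===== PORT A =====
-- skew[i] is always present when read (keys 0..i were inserted), so Python's skew[i]
-- never raises: ported as getD i 0.  Genome[i] with i in range(len) never raises either.
def SkewArrayDictionary (Genome : String) : PySem.Dict Int Int :=
  let skew : PySem.Dict Int Int := (PySem.Dict.empty).insert 0 0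
  (PySem.List.pyRange 0 (PySem.Str.len Genome) 1).foldl (fun skew i =>
    let c := PySem.Str.pyGet? Genome i
    if c = some 'A' ∨ c = some 'T' then skew.insert (i + 1) (skew.getD i 0)
    else if c = some 'G' then skew.insert (i + 1) (skew.getD i 0 + 1)
    else skew.insert (i + 1) (skew.getD i 0 - 1)) skew

-- max(x.values()) never raises: values always contains skew[0]; ported as max? … |>.getD 0.
def MaximumSkew (Genome : String) : List Int :=
  let positions : List Int := []
  let x := SkewArrayDictionary Genome
  let maximum : Int := (PySem.List.max? x.values (fun v => v)).getD 0
  x.keys.foldl (fun positions i => if x.getD i 0 = maximum then positions ++ [i] else positions) positions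

-- ===== PORT B =====
def MaximumSkew_alt (Genome : String) : List Int :=
  ((PySem.List.enumerate Genome.toList 0).foldl (fun (st : Int × Int × List Int) p =>
      let skew : Int := if p.2 = 'G' then st.1 + 1
                        else if p.2 ≠ 'A' ∧ p.2 ≠ 'T' then st.1 - 1
                        else st.1
      if skew > st.2.1 then (skew, skew, [p.1 + 1])
      else if skew = st.2.1 then (skew, st.2.1, st.2.2 ++ [p.1 + 1])
      else (skew, st.2.1, st.2.2)) (0, 0, [0])).2.2

-- ===== PRECONDITION & SPEC =====
def Spec_MaximumSkew (Genome : String) (out : List Int) : Prop := out = MaximumSkew_alt Genome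
instance (Genome : String) (out : List Int) : Decidable (Spec_MaximumSkew Genome out) := by unfold Spec_MaximumSkew; infer_instance

-- ===== CLAIM (what is proved, stated in full; the proofs are below) =====
def Claim_equal_MaximumSkew : Prop := ∀ (Genome : String), Dom_MaximumSkew Genome → Spec_MaximumSkew Genome (MaximumSkew Genome)


-- ===== LEMMAS AND PROOFS =====

-- the per-character skew increment shared by both proofs
def stepc (c : Char) : Int := if c = 'A' ∨ c = 'T' then 0 else if c = 'G' then 1 else -1

-- cumulative skew after the first k characters
def sk (cs : List Char) (k : Nat) : Int := ((cs.take k).map stepc).sum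

-- the maximal cumulative skew over positions 0..length
def Mx (cs : List Char) : Int := ((List.range (cs.length + 1)).map (sk cs)).foldl max 0

-- the reference answer: positions attaining the maximum, left to right
def posRef (cs : List Char) : List Int :=
  ((List.range (cs.length + 1)).filter (fun k => decide (sk cs k = Mx cs))).map (fun (k : Nat) => (k : Int))

theorem sk_zero (cs : List Char) : sk cs 0 = 0 := by simp [sk]

theorem sk_append_le (cs : List Char) (c : Char) {k : Nat} (h : k ≤ cs.length) :
    sk (cs ++ [c]) k = sk cs k := by
  simp [sk, List.take_append_of_le_length h]

theorem sk_append_succ (cs : List Char) (c : Char) :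
    sk (cs ++ [c]) (cs.length + 1) = sk cs cs.length + stepc c := by
  have h : (cs ++ [c]).take (cs.length + 1) = cs ++ [c] := List.take_of_length_le (by simp)
  have h2 : cs.take cs.length = cs := List.take_length ..
  simp [sk, h, h2]

theorem sk_le_Mx (cs : List Char) {k : Nat} (h : k ≤ cs.length) : sk cs k ≤ Mx cs := by
  have hm : sk cs k ∈ (List.range (cs.length + 1)).map (sk cs) :=
    List.mem_map_of_mem (List.mem_range.2 (by omega))
  exact (PySem.List.le_foldl_max _ 0).2 _ hm

theorem map_sk_append (cs : List Char) (c : Char) :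
    (List.range (cs.length + 1)).map (sk (cs ++ [c])) = (List.range (cs.length + 1)).map (sk cs) := by
  apply List.map_congr_left
  intro k hk
  exact sk_append_le cs c (by have := List.mem_range.1 hk; omega)

theorem Mx_append (cs : List Char) (c : Char) :
    Mx (cs ++ [c]) = max (Mx cs) (sk cs cs.length + stepc c) := by
  unfold Mx
  have hl : (cs ++ [c]).length + 1 = (cs.length + 1) + 1 := by simp
  rw [hl, List.range_succ, List.map_append, List.foldl_append, map_sk_append]
  simp [sk_append_succ]

-- A's dict-building loop, at the List Char level
def buildD (cs : List Char) : PySem.Dict Int Int :=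
  (PySem.List.pyRange 0 (cs.length : Int) 1).foldl
    (fun d i => d.insert (i + 1) (d.getD i 0 + stepc (PySem.List.pyGetD cs i ' ')))
    (PySem.Dict.empty.insert 0 0)

theorem skewDict_eq (G : String) : SkewArrayDictionary G = buildD G.toList := by
  unfold SkewArrayDictionary buildD
  have hlen : PySem.Str.len G = (G.toList.length : Int) := PySem.Str.len_eq G
  rw [hlen]
  apply PySem.List.foldl_congr_mem
  intro d i hi
  obtain ⟨h0, h1⟩ := PySem.List.mem_pyRange_one.mp hi
  obtain ⟨k, rfl⟩ : ∃ k : Nat, i = (k : Int) := ⟨i.toNat, (Int.toNat_of_nonneg h0).symm⟩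
  have hk : k < G.toList.length := by exact_mod_cast h1
  have hget : PySem.Str.pyGet? G (k : Int) = some (G.toList[k]) := by
    simp [List.getElem?_eq_getElem hk]
  have hgetD : PySem.List.pyGetD G.toList (k : Int) ' ' = G.toList[k] := by
    simp [PySem.List.pyGetD_natCast, List.getElem?_eq_getElem hk]
  rw [hget, hgetD]
  unfold stepc
  split_ifs with hAT hG <;> simp_all <;> ring_nf

theorem keys_buildD_of_items (cs : List Char)
    (h : (buildD cs).items = (List.range (cs.length + 1)).map (fun (k : Nat) => ((k : Int), sk cs k))) :
    (buildD cs).keys = (List.range (cs.length + 1)).map (fun (k : Nat) => (k : Int)) := by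
  show (buildD cs).items.map (·.1) = _
  rw [h, List.map_map]
  rfl

theorem buildD_items (cs : List Char) :
    (buildD cs).items = (List.range (cs.length + 1)).map (fun (k : Nat) => ((k : Int), sk cs k)) := by
  induction cs using List.reverseRecOn with
  | nil => decide
  | append_singleton cs c ih =>
    have hsplit : PySem.List.pyRange 0 (((cs ++ [c]).length : Nat) : Int) 1
        = PySem.List.pyRange 0 (cs.length : Int) 1 ++ [(cs.length : Int)] := by
      have h1 : (((cs ++ [c]).length : Nat) : Int) = (cs.length : Int) + 1 := by
        simp
      rw [h1, PySem.List.pyRange_one_succ_right (by positivity)]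
    unfold buildD
    rw [hsplit, List.foldl_append]
    have hpref : (PySem.List.pyRange 0 (cs.length : Int) 1).foldl
        (fun d i => d.insert (i + 1) (d.getD i 0 + stepc (PySem.List.pyGetD (cs ++ [c]) i ' ')))
        (PySem.Dict.empty.insert 0 0) = buildD cs := by
      unfold buildD
      apply PySem.List.foldl_congr_mem
      intro d i hi
      obtain ⟨h0, h1⟩ := PySem.List.mem_pyRange_one.mp hi
      obtain ⟨k, rfl⟩ : ∃ k : Nat, i = (k : Int) := ⟨i.toNat, (Int.toNat_of_nonneg h0).symm⟩
      have hk : k < cs.length := by exact_mod_cast h1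
      have : PySem.List.pyGetD (cs ++ [c]) (k : Int) ' ' = PySem.List.pyGetD cs (k : Int) ' ' := by
        simp [PySem.List.pyGetD_natCast, List.getElem?_append_left hk]
      rw [this]
    rw [hpref]
    have hkeys := keys_buildD_of_items cs ih
    have hnodup : (buildD cs).keys.Nodup := by
      rw [hkeys]
      exact List.Nodup.map (fun a b h => by exact_mod_cast h) (List.nodup_range)
    have hmem : ((cs.length : Int), sk cs cs.length) ∈ (buildD cs).items := by
      rw [ih]
      exact List.mem_map_of_mem (List.mem_range.2 (by omega))
    have hgetD : (buildD cs).getD (cs.length : Int) 0 = sk cs cs.length :=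
      PySem.Dict.getD_of_mem_items _ hmem hnodup 0
    have hcont : (buildD cs).contains ((cs.length : Int) + 1) = false := by
      rw [PySem.Dict.contains_eq_decide_mem_keys, hkeys]
      simp only [decide_eq_false_iff_not, List.mem_map, List.mem_range]
      rintro ⟨k, hk, hek⟩
      omega
    have hlast : PySem.List.pyGetD (cs ++ [c]) ((cs.length : Nat) : Int) ' ' = c := by
      simp [PySem.List.pyGetD_natCast]
    simp only [List.foldl_cons, List.foldl_nil]
    rw [hlast, hgetD, PySem.Dict.items_insert_of_not_contains _ _ hcont, ih]
    have hr : (cs ++ [c]).length + 1 = (cs.length + 1) + 1 := by simp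
    have hR : (List.range ((cs ++ [c]).length + 1)).map (fun (k : Nat) => ((k : Int), sk (cs ++ [c]) k))
        = (List.range (cs.length + 1)).map (fun (k : Nat) => ((k : Int), sk cs k))
          ++ [((cs.length : Int) + 1, sk cs cs.length + stepc c)] := by
      rw [hr, List.range_succ, List.map_append]
      congr 1
      · apply List.map_congr_left
        intro k hk
        have : k ≤ cs.length := by have := List.mem_range.1 hk; omega
        simp [sk_append_le cs c this]
      · simp only [List.map_cons, List.map_nil, sk_append_succ]
        push_cast
        rfl
    rw [hR]

theorem MaximumSkew_eq_posRef (G : String) : MaximumSkew G = posRef G.toList := by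
  unfold MaximumSkew
  rw [skewDict_eq]
  have hitems := buildD_items G.toList
  have hkeys := keys_buildD_of_items G.toList hitems
  have hvals : (buildD G.toList).values = (List.range (G.toList.length + 1)).map (sk G.toList) := by
    show (buildD G.toList).items.map (·.2) = _
    rw [hitems, List.map_map]
    rfl
  have hnodup : (buildD G.toList).keys.Nodup := by
    rw [hkeys]
    exact List.Nodup.map (fun a b h => by exact_mod_cast h) (List.nodup_range)
  have hgetD : ∀ k ∈ List.range (G.toList.length + 1),
      (buildD G.toList).getD ((k : Nat) : Int) 0 = sk G.toList k := by
    intro k hk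
    exact PySem.Dict.getD_of_mem_items _ (hitems ▸ List.mem_map_of_mem hk) hnodup 0
  have hmax : (PySem.List.max? (buildD G.toList).values (fun v => v)).getD 0 = Mx G.toList := by
    rw [hvals, List.range_succ_eq_map, List.map_cons, PySem.List.max?_id_cons]
    simp only [Option.getD_some]
    unfold Mx
    rw [List.range_succ_eq_map, List.map_cons, List.foldl_cons, sk_zero]
    rfl
  show (buildD G.toList).keys.foldl (fun positions i =>
      if (buildD G.toList).getD i 0 = (PySem.List.max? (buildD G.toList).values (fun v => v)).getD 0
      then positions ++ [i] else positions) [] = posRef G.toList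
  rw [hmax, PySem.List.foldl_append_ite_eq_filter, hkeys, List.filter_map, List.nil_append]
  unfold posRef
  congr 1
  apply List.filter_congr
  intro k hk
  simp [Function.comp, hgetD k hk]

-- B's fold reaches (final skew, running maximum, positions) = (sk, Mx, posRef)
theorem alt_fold (cs : List Char) :
    (PySem.List.enumerate cs 0).foldl (fun (st : Int × Int × List Int) p =>
      let skew : Int := if p.2 = 'G' then st.1 + 1
                        else if p.2 ≠ 'A' ∧ p.2 ≠ 'T' then st.1 - 1
                        else st.1
      if skew > st.2.1 then (skew, skew, [p.1 + 1])
      else if skew = st.2.1 then (skew, st.2.1, st.2.2 ++ [p.1 + 1])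
      else (skew, st.2.1, st.2.2)) (0, 0, [0])
    = (sk cs cs.length, Mx cs, posRef cs) := by
  induction cs using List.reverseRecOn with
  | nil => decide
  | append_singleton cs c ih =>
    rw [PySem.List.enumerate_append, List.foldl_append, ih,
        PySem.List.enumerate_cons, PySem.List.enumerate_nil, List.foldl_cons, List.foldl_nil]
    have hstep : (if c = 'G' then sk cs cs.length + 1
        else if c ≠ 'A' ∧ c ≠ 'T' then sk cs cs.length - 1
        else sk cs cs.length) = sk cs cs.length + stepc c := by
      unfold stepc
      split_ifs <;> simp_all <;> omega
    dsimp only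
    simp only [zero_add, hstep]
    have hlen : (cs ++ [c]).length = cs.length + 1 := by simp
    have hsk : sk (cs ++ [c]) ((cs ++ [c]).length) = sk cs cs.length + stepc c := by
      rw [hlen]; exact sk_append_succ cs c
    have hMx := Mx_append cs c
    have hposg : Mx cs < sk cs cs.length + stepc c →
        posRef (cs ++ [c]) = [((cs.length : Int) + 1)] := by
      intro h
      unfold posRef
      rw [hlen, List.range_succ, List.filter_append]
      have h1 : (List.range (cs.length + 1)).filter
          (fun k => decide (sk (cs ++ [c]) k = Mx (cs ++ [c]))) = [] := by
        apply List.filter_eq_nil_iff.2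
        intro k hk
        have hkle : k ≤ cs.length := by have := List.mem_range.1 hk; omega
        rw [sk_append_le cs c hkle, hMx]
        have := sk_le_Mx cs hkle
        simp only [decide_eq_true_eq]
        omega
      rw [h1]
      have h2 : sk (cs ++ [c]) (cs.length + 1) = Mx (cs ++ [c]) := by
        rw [sk_append_succ, hMx]
        omega
      simp [h2]
    have hpose : sk cs cs.length + stepc c = Mx cs →
        posRef (cs ++ [c]) = posRef cs ++ [((cs.length : Int) + 1)] := by
      intro h
      unfold posRef
      rw [hlen, List.range_succ, List.filter_append]
      have hMx' : Mx (cs ++ [c]) = Mx cs := by rw [hMx]; omega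
      have h1 : (List.range (cs.length + 1)).filter
          (fun k => decide (sk (cs ++ [c]) k = Mx (cs ++ [c])))
          = (List.range (cs.length + 1)).filter (fun k => decide (sk cs k = Mx cs)) := by
        apply List.filter_congr
        intro k hk
        have hkle : k ≤ cs.length := by have := List.mem_range.1 hk; omega
        rw [sk_append_le cs c hkle, hMx']
      have h2 : sk (cs ++ [c]) (cs.length + 1) = Mx (cs ++ [c]) := by
        rw [sk_append_succ, hMx']
        omega
      rw [h1]
      simp [h2]
    have hposl : sk cs cs.length + stepc c < Mx cs →
        posRef (cs ++ [c]) = posRef cs := by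
      intro h
      unfold posRef
      rw [hlen, List.range_succ, List.filter_append]
      have hMx' : Mx (cs ++ [c]) = Mx cs := by rw [hMx]; omega
      have h1 : (List.range (cs.length + 1)).filter
          (fun k => decide (sk (cs ++ [c]) k = Mx (cs ++ [c])))
          = (List.range (cs.length + 1)).filter (fun k => decide (sk cs k = Mx cs)) := by
        apply List.filter_congr
        intro k hk
        have hkle : k ≤ cs.length := by have := List.mem_range.1 hk; omega
        rw [sk_append_le cs c hkle, hMx']
      have h2 : ¬ (sk (cs ++ [c]) (cs.length + 1) = Mx (cs ++ [c])) := by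
        rw [sk_append_succ, hMx']
        omega
      rw [h1]
      simp [h2]
    by_cases h1 : sk cs cs.length + stepc c > Mx cs
    · rw [if_pos h1, hposg h1, hsk, hMx, max_eq_right (le_of_lt h1)]
    · rw [if_neg h1]
      by_cases h2 : sk cs cs.length + stepc c = Mx cs
      · rw [if_pos h2, hpose h2, hsk, hMx, h2, max_self]
      · rw [if_neg h2, hposl (by omega), hsk, hMx, max_eq_left (by omega)]

theorem MaximumSkew_eq_alt (Genome : String) : MaximumSkew Genome = MaximumSkew_alt Genome := by
  unfold MaximumSkew_alt
  rw [alt_fold, MaximumSkew_eq_posRef]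

-- ===== VERDICT (by name: the statement is the Claim_ definition above) =====
theorem MaximumSkew_spec : Claim_equal_MaximumSkew := by
  intro G _
  exact MaximumSkew_eq_alt G
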